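-- pv_equiv track=rewrite | github.com/millstar324/2026-CT_Study | [DAY2] LV1_바탕화면_정리/바탕화면_정리_송채원.py | find_ls
-- ===== SOURCE A (Python) =====
-- def find_ls(w, r, c):
--     ls = c-1
--     for i in w:
--         for j, v in enumerate(list(i)):
--             if  (v == '#') and (j < ls):
--                 ls = j
--                 break
--
--     return ls
-- ===== SOURCE B (Python) =====
-- def find_ls(w, r, c):
--     width = 0
--     for row in w:
--         width = max(width, len(row))
--     for j in range(min(c - 1, width)):
--         if any(j < len(row) and row[j] == '#' for row in w):
--             return j
--     return c - 1
-- ===== Notes on version B (the rewrite author's own statement) =====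
-- stated objective: alternative
-- what changed: Replaced A's row-major scan (per-row first '#' with a running minimum) by a column-major scan: compute the widest row, then return the first column j < min(c-1, width) at which any row has a '#', defaulting to c-1.
import Mathlib
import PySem

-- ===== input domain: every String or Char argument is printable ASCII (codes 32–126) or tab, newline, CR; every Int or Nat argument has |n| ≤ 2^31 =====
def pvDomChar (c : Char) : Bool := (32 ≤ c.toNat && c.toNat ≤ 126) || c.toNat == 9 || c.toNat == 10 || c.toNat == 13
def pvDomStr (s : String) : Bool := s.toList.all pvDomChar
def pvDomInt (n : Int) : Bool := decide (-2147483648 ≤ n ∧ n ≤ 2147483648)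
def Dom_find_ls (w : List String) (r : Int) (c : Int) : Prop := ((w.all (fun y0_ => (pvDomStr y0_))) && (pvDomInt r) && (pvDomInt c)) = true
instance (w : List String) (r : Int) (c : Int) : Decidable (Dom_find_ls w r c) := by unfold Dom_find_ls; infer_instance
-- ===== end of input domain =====

-- B replaces A's row-major scan (per-row first '#' with a running minimum) by a
-- column-major scan returning the first column j < c-1 containing a '#' (else c-1);
-- objective: alternative decomposition, same exact result.

-- ===== PORT A =====
-- inner loop: for j, v in enumerate(list(i)): if v == '#' and j < ls: ls = j; break
def findLsRow (cs : List Char) (j : Nat) (ls : Int) : Int :=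
  match cs with
  | [] => ls
  | v :: rest => if v = '#' ∧ (j : Int) < ls then (j : Int) else findLsRow rest (j + 1) ls

def find_ls (w : List String) (r : Int) (c : Int) : Int :=
  w.foldl (fun ls i => findLsRow i.toList 0 ls) (c - 1)

-- ===== PORT B =====
-- any(j < len(row) and row[j] == '#' for row in w)
def colHit (w : List String) (j : Int) : Bool :=
  w.any (fun row => decide (j < PySem.Str.len row) && decide (PySem.Str.pyGet? row j = some '#'))

-- width = 0; for row in w: width = max(width, len(row))
def rowWidth (w : List String) : Int :=
  w.foldl (fun acc row => max acc (PySem.Str.len row)) 0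

-- for j in range(min(c-1, width)): if colHit: return j;  falling through: return c-1
-- (range is a lazy counter in Python 3; ported as the counting recursion it is)
def colScan (w : List String) (j : Int) (stop : Int) (c : Int) : Int :=
  if h : j < stop then
    (if colHit w j then j else colScan w (j + 1) stop c)
  else c - 1
termination_by (stop - j).toNat
decreasing_by omega

def find_ls_alt (w : List String) (r : Int) (c : Int) : Int :=
  colScan w 0 (min (c - 1) (rowWidth w)) c

-- ===== PRECONDITION & SPEC =====
def Spec_find_ls (w : List String) (r : Int) (c : Int) (out : Int) : Prop := out = find_ls_alt w r c
instance (w : List String) (r : Int) (c : Int) (out : Int) : Decidable (Spec_find_ls w r c out) := by unfold Spec_find_ls; infer_instance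

-- ===== CLAIM (what is proved, stated in full; the proofs are below) =====
def Claim_equal_find_ls : Prop := ∀ (w : List String) (r : Int) (c : Int), Dom_find_ls w r c → Spec_find_ls w r c (find_ls w r c)

-- ===== LEMMAS AND PROOFS =====

-- column j holds a '#' in some row of w
def hasHash (w : List String) (j : Nat) : Prop := ∃ row ∈ w, row.toList[j]? = some '#'

-- minimum of two optional Nats (none = +∞)
def omin : Option Nat → Option Nat → Option Nat
  | none, b => b
  | some a, none => some a
  | some a, some b => some (min a b)

-- least '#' column over all rows (none = no '#' anywhere)
def minHash : List String → Option Nat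
  | [] => none
  | row :: rest => omin (row.toList.findIdx? (· = '#')) (minHash rest)

lemma findLsRow_eq (cs : List Char) : ∀ (j : Nat) (ls : Int),
    findLsRow cs j ls =
      (cs.findIdx? (· = '#')).elim ls
        (fun k => if ((j + k : Nat) : Int) < ls then ((j + k : Nat) : Int) else ls) := by
  induction cs with
  | nil => intro j ls; simp [findLsRow]
  | cons v rest ih =>
    intro j ls
    by_cases hv : v = '#'
    · subst hv
      simp only [findLsRow, List.findIdx?_cons, decide_true, if_true, true_and,
        Option.elim_some]
      by_cases h1 : (j : Int) < ls
      · simp [h1]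
      · rw [if_neg h1, ih]
        cases h : rest.findIdx? (· = '#') with
        | none => simp [h1]
        | some k => simp only [Option.elim_some]; split_ifs <;> omega
    · simp only [findLsRow, List.findIdx?_cons, hv, decide_false, ih]
      cases h : rest.findIdx? (· = '#') with
      | none => simp
      | some k =>
        simp only [Bool.false_eq_true, if_false, false_and, Option.map_some, Option.elim_some]
        split_ifs <;> omega

lemma find_ls_eq_minHash (w : List String) : ∀ (ls : Int),
    w.foldl (fun ls i => findLsRow i.toList 0 ls) ls =
      (minHash w).elim ls (fun m => if (m : Int) < ls then (m : Int) else ls) := by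
  induction w with
  | nil => intro ls; simp [minHash]
  | cons row rest ih =>
    intro ls
    rw [List.foldl_cons, ih, findLsRow_eq]
    cases h1 : row.toList.findIdx? (· = '#') with
    | none => simp only [minHash, h1, omin, Option.elim_none]
    | some k =>
      cases h2 : minHash rest with
      | none =>
        simp only [minHash, h1, h2, omin, Option.elim_none, Option.elim_some, Nat.zero_add]
      | some m =>
        simp only [minHash, h1, h2, omin, Option.elim_some, Nat.zero_add]
        split_ifs <;> omega

lemma minHash_none_iff (w : List String) :
    minHash w = none ↔ ∀ j : Nat, ¬ hasHash w j := by
  induction w with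
  | nil => simp [minHash, hasHash]
  | cons row rest ih =>
    cases h1 : row.toList.findIdx? (· = '#') with
    | none =>
      have hrow : ∀ j : Nat, row.toList[j]? ≠ some '#' := by
        intro j hj
        have hmem : j < row.toList.length := by
          by_contra hge
          rw [List.getElem?_eq_none (Nat.le_of_not_lt hge)] at hj
          cases hj
        have h2 := List.findIdx?_eq_none_iff.mp h1 row.toList[j] (List.getElem_mem hmem)
        rw [List.getElem?_eq_getElem hmem, Option.some_inj] at hj
        simp [hj] at h2
      constructor
      · intro h j hj
        obtain ⟨r', hr', hc⟩ := hj
        rcases List.mem_cons.mp hr' with rfl | hr'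
        · exact hrow j hc
        · exact (ih.mp (by simpa [minHash, h1, omin] using h) j) ⟨r', hr', hc⟩
      · intro h
        simp only [minHash, h1, omin]
        exact ih.mpr (fun j hj => h j (by obtain ⟨r', hr', hc⟩ := hj; exact ⟨r', List.mem_cons_of_mem _ hr', hc⟩))
    | some k =>
      have hne : minHash (row :: rest) ≠ none := by
        simp only [minHash, h1]
        cases minHash rest <;> simp [omin]
      constructor
      · intro h; exact absurd h hne
      · intro h
        exfalso
        obtain ⟨hlt, hp, _⟩ := List.findIdx?_eq_some_iff_getElem.mp h1
        simp only [decide_eq_true_eq] at hp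
        exact h k ⟨row, List.mem_cons_self, by rw [List.getElem?_eq_getElem hlt, hp]⟩

lemma minHash_some_has (w : List String) (m : Nat) (h : minHash w = some m) :
    hasHash w m := by
  induction w generalizing m with
  | nil => simp [minHash] at h
  | cons row rest ih =>
    simp only [minHash] at h
    cases h1 : row.toList.findIdx? (· = '#') with
    | none =>
      rw [h1] at h
      simp only [omin] at h
      obtain ⟨r', hr', hc⟩ := ih m h
      exact ⟨r', List.mem_cons_of_mem _ hr', hc⟩
    | some k =>
      rw [h1] at h
      obtain ⟨hlt, hp, _⟩ := List.findIdx?_eq_some_iff_getElem.mp h1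
      simp only [decide_eq_true_eq] at hp
      cases h2 : minHash rest with
      | none =>
        rw [h2] at h; simp only [omin, Option.some_inj] at h
        exact ⟨row, List.mem_cons_self, by rw [← h, List.getElem?_eq_getElem hlt, hp]⟩
      | some m' =>
        rw [h2] at h; simp only [omin, Option.some_inj] at h
        by_cases hle : k ≤ m'
        · have hm : m = k := by omega
          exact ⟨row, List.mem_cons_self, by rw [hm, List.getElem?_eq_getElem hlt, hp]⟩
        · have hm : m = m' := by omega
          obtain ⟨r', hr', hc⟩ := ih m' h2
          exact ⟨r', List.mem_cons_of_mem _ hr', by rw [hm]; exact hc⟩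

lemma minHash_le (w : List String) (m : Nat) (h : minHash w = some m) :
    ∀ j : Nat, hasHash w j → m ≤ j := by
  induction w generalizing m with
  | nil => intro j hj; simp [hasHash] at hj
  | cons row rest ih =>
    intro j hj
    obtain ⟨r', hr', hc⟩ := hj
    simp only [minHash] at h
    rcases List.mem_cons.mp hr' with rfl | hr'
    · have hjlt : j < r'.toList.length := by
        by_contra hge
        rw [List.getElem?_eq_none (Nat.le_of_not_lt hge)] at hc
        cases hc
      rw [List.getElem?_eq_getElem hjlt, Option.some_inj] at hc
      cases h1 : r'.toList.findIdx? (· = '#') with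
      | none =>
        exfalso
        have h2 := List.findIdx?_eq_none_iff.mp h1 r'.toList[j] (List.getElem_mem hjlt)
        simp [hc] at h2
      | some k =>
        obtain ⟨hlt, hp, hmin⟩ := List.findIdx?_eq_some_iff_getElem.mp h1
        have hkj : k ≤ j := by
          by_contra hgt
          have h3 := hmin j (by omega)
          simp [hc] at h3
        rw [h1] at h
        cases h2 : minHash rest with
        | none => rw [h2] at h; simp only [omin, Option.some_inj] at h; omega
        | some m' => rw [h2] at h; simp only [omin, Option.some_inj] at h; omega
    · have hrest : hasHash rest j := ⟨r', hr', hc⟩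
      cases h1 : row.toList.findIdx? (· = '#') with
      | none =>
        rw [h1] at h; simp only [omin] at h
        exact ih m h j hrest
      | some k =>
        rw [h1] at h
        cases h2 : minHash rest with
        | none =>
          exfalso
          exact (minHash_none_iff rest).mp h2 j hrest
        | some m' =>
          rw [h2] at h; simp only [omin, Option.some_inj] at h
          have := ih m' h2 j hrest
          omega

lemma colHit_iff (w : List String) (j : Int) (hj : 0 ≤ j) :
    colHit w j = true ↔ hasHash w j.toNat := by
  unfold colHit hasHash
  rw [List.any_eq_true]
  constructor
  · rintro ⟨row, hrow, hb⟩
    simp only [Bool.and_eq_true, decide_eq_true_eq] at hb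
    obtain ⟨_, hget⟩ := hb
    refine ⟨row, hrow, ?_⟩
    rwa [show j = ((j.toNat : Nat) : Int) by omega, PySem.Str.pyGet?_natCast] at hget
  · rintro ⟨row, hrow, hget⟩
    refine ⟨row, hrow, ?_⟩
    have hlen : j.toNat < row.toList.length := by
      by_contra hge
      rw [List.getElem?_eq_none (Nat.le_of_not_lt hge)] at hget
      cases hget
    simp only [Bool.and_eq_true, decide_eq_true_eq]
    refine ⟨?_, ?_⟩
    · rw [PySem.Str.len_eq]; omega
    · rwa [show j = ((j.toNat : Nat) : Int) by omega, PySem.Str.pyGet?_natCast]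

lemma rowWidth_nonneg (w : List String) : 0 ≤ rowWidth w :=
  (PySem.List.le_foldl_max_int w PySem.Str.len 0).1

lemma not_hasHash_of_wide (w : List String) (j : Nat) (hj : rowWidth w ≤ (j : Int)) :
    ¬ hasHash w j := by
  rintro ⟨row, hrow, hc⟩
  unfold rowWidth at hj
  have hb := (PySem.List.le_foldl_max_int w PySem.Str.len 0).2 row hrow
  rw [PySem.Str.len_eq] at hb
  have hlen : row.toList.length ≤ j := by omega
  rw [List.getElem?_eq_none hlen] at hc
  cases hc

lemma colScan_spec (w : List String) (c : Int) : ∀ (n : Nat) (a : Int), 0 ≤ a →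
    a + n = min (c - 1) (rowWidth w) →
    (∀ j : Nat, (j : Int) < a → ¬ hasHash w j) →
    colScan w a (min (c - 1) (rowWidth w)) c =
      (minHash w).elim (c - 1) (fun m => if (m : Int) < c - 1 then (m : Int) else c - 1) := by
  intro n
  induction n with
  | zero =>
    intro a ha hac hbelow
    rw [colScan, dif_neg (by omega)]
    cases h : minHash w with
    | none => rfl
    | some m =>
      have hn : ¬ ((m : Int) < c - 1) := by
        intro hlt
        have hw : (m : Int) < rowWidth w := by
          by_contra hge
          exact not_hasHash_of_wide w m (by omega) (minHash_some_has w m h)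
        exact hbelow m (by omega) (minHash_some_has w m h)
      simp only [Option.elim_some, if_neg hn]
  | succ n ihn =>
    intro a ha hac hbelow
    rw [colScan, dif_pos (by omega)]
    by_cases hhit : colHit w a
    · rw [if_pos hhit]
      have hhas : hasHash w a.toNat := (colHit_iff w a ha).mp hhit
      cases h : minHash w with
      | none => exact absurd hhas ((minHash_none_iff w).mp h a.toNat)
      | some m =>
        have hma : m ≤ a.toNat := minHash_le w m h a.toNat hhas
        have hge : ¬ ((m : Int) < a) := fun hlt => hbelow m hlt (minHash_some_has w m h)
        have hm : (m : Int) = a := by omega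
        simp only [Option.elim_some]
        rw [if_pos (by omega), hm]
    · rw [if_neg hhit]
      refine ihn (a + 1) (by omega) (by omega) ?_
      intro j hj
      by_cases hja : (j : Int) < a
      · exact hbelow j hja
      · have hj' : (j : Int) = a := by omega
        intro hhas
        exact hhit ((colHit_iff w a ha).mpr (by rwa [show a.toNat = j by omega]))

-- ===== VERDICT (by name: the statement is the Claim_ definition above) =====
theorem find_ls_spec : Claim_equal_find_ls := by
  intro w r c _
  unfold Spec_find_ls find_ls find_ls_alt
  rw [find_ls_eq_minHash]
  have hw0 : 0 ≤ rowWidth w := rowWidth_nonneg w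
  by_cases hs : 0 < min (c - 1) (rowWidth w)
  · rw [colScan_spec w c (min (c - 1) (rowWidth w)).toNat 0 le_rfl (by omega)
      (by intro j hj; omega)]
  · rw [colScan, dif_neg (by omega)]
    cases h : minHash w with
    | none => rfl
    | some m =>
      simp only [Option.elim_some]
      rw [if_neg ?_]
      intro hlt
      have hw : (m : Int) < rowWidth w := by
        by_contra hge
        exact not_hasHash_of_wide w m (by omega) (minHash_some_has w m h)
      omega
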